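-- pv_equiv track=rewrite | github.com/gayathriev/fuzzer | modes/txt_fuzzer.py | large_positives
-- ===== SOURCE A (Python) =====
-- import copy
--
-- def large_positives(sample_txt, perm_inputs):
--     # Generate large numbers '32' for intruction size
--     mutated_copy = copy.deepcopy(sample_txt)
--     for i in range(0, 32):
--         y = str(2 ** i)
--         for line in range(len(mutated_copy)):
--             mutated_copy = copy.deepcopy(sample_txt)
--             mutated_copy[line] = y + '\n'
--             perm_inputs.append("".join(mutated_copy))
--     return perm_inputs
-- ===== SOURCE B (Python) =====
-- def large_positives(sample_txt, perm_inputs):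
--     # Precompute join prefixes/suffixes once; same i-outer/line-inner emit order as A.
--     n = len(sample_txt)
--     prefixes = ["".join(sample_txt[:j]) for j in range(n)]
--     suffixes = ["".join(sample_txt[j + 1:]) for j in range(n)]
--     for i in range(32):
--         y = str(2 ** i)
--         for j in range(n):
--             perm_inputs.append(prefixes[j] + y + "\n" + suffixes[j])
--     return perm_inputs
-- ===== Notes on version B (the rewrite author's own statement) =====
-- stated objective: simpler
-- what changed: B precomputes the joined prefix and suffix of each line index once and emits prefixes[j] + y + ' ' + suffixes[j], instead of deep-copying the whole list and re-joining it for every (power, line) pair.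
import Mathlib
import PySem

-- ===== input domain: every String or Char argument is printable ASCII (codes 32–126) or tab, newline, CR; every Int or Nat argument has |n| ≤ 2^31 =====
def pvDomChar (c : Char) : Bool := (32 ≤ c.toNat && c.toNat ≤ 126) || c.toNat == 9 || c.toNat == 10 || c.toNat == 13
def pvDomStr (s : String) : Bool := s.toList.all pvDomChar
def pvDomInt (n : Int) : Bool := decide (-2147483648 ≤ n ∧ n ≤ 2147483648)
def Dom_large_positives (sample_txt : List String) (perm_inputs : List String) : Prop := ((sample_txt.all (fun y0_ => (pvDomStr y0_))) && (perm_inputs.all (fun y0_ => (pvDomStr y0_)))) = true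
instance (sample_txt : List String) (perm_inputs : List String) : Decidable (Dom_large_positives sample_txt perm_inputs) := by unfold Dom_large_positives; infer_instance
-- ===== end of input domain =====

-- B precomputes joined prefixes/suffixes once instead of rebuilding and re-joining a full copy
-- per emitted line (objective: simpler decomposition); both A and B append to perm_inputs
-- in place in Python — the equivalence proved here is about the returned list value.


-- ===== PORT A =====
-- deepcopy of a list of strings is a value copy: a List value already.  range(len(mutated_copy))
-- is computed once, from the initial copy, so its bound is sample_txt.length.
-- mutated_copy[line] = … at 0 ≤ line < len is exactly List.set.
def large_positives (sample_txt : List String) (perm_inputs : List String) : List String :=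
  (PySem.List.pyRange 0 32 1).foldl (fun acc i =>
    let y := PySem.Int.toStr (2 ^ i.toNat)
    (PySem.List.pyRange 0 (sample_txt.length : Int) 1).foldl (fun acc2 line =>
      let mutated := sample_txt.set line.toNat (y ++ "\n")
      acc2 ++ [PySem.Str.join "" mutated]) acc) perm_inputs

-- ===== PORT B =====
def large_positives_alt (sample_txt : List String) (perm_inputs : List String) : List String :=
  let n : Int := sample_txt.length
  let prefixes := (PySem.List.pyRange 0 n 1).map
    (fun j => PySem.Str.join "" (PySem.List.slice sample_txt none (some j)))
  let suffixes := (PySem.List.pyRange 0 n 1).map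
    (fun j => PySem.Str.join "" (PySem.List.slice sample_txt (some (j + 1)) none))
  (PySem.List.pyRange 0 32 1).foldl (fun acc i =>
    let y := PySem.Int.toStr (2 ^ i.toNat)
    (PySem.List.pyRange 0 n 1).foldl (fun acc2 j =>
      acc2 ++ [PySem.List.pyGetD prefixes j "" ++ y ++ "\n" ++ PySem.List.pyGetD suffixes j ""]) acc) perm_inputs

-- ===== PRECONDITION & SPEC =====
def Spec_large_positives (sample_txt : List String) (perm_inputs : List String) (out : List String) : Prop := out = large_positives_alt sample_txt perm_inputs
instance (sample_txt : List String) (perm_inputs : List String) (out : List String) : Decidable (Spec_large_positives sample_txt perm_inputs out) := by unfold Spec_large_positives; infer_instance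

-- ===== CLAIM (what is proved, stated in full; the proofs are below) =====
def Claim_equal_large_positives : Prop := ∀ (sample_txt : List String) (perm_inputs : List String), Dom_large_positives sample_txt perm_inputs → Spec_large_positives sample_txt perm_inputs (large_positives sample_txt perm_inputs)

-- ===== LEMMAS AND PROOFS =====

-- ''.join is flatten of the character lists
theorem join_empty (p : List (List Char)) : PySem.Chars.join [] p = p.flatten := by
  induction p with
  | nil => simp [PySem.Chars.join_nil]
  | cons a l ih =>
    cases l with
    | nil => simp [PySem.Chars.join_singleton]
    | cons b m => rw [PySem.Chars.join_cons_cons] at *; simp_all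

-- joining an in-range set equals prefix ++ new element ++ suffix
theorem join_set_eq (xs : List String) (j : Nat) (s : String) (h : j < xs.length) :
    PySem.Str.join "" (xs.set j s)
      = PySem.Str.join "" (xs.take j) ++ s ++ PySem.Str.join "" (xs.drop (j + 1)) := by
  apply String.toList_inj.mp
  simp [PySem.Str.toList_join, join_empty, List.set_eq_take_append_cons_drop, h]

-- the two per-line appended strings coincide for every line index in range
theorem elem_eq (sample_txt : List String) (y : String) (line : Int)
    (h0 : 0 ≤ line) (h1 : line < (sample_txt.length : Int)) :
    PySem.Str.join "" (sample_txt.set line.toNat (y ++ "\n"))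
      = PySem.List.pyGetD ((PySem.List.pyRange 0 (sample_txt.length : Int) 1).map
            (fun j => PySem.Str.join "" (PySem.List.slice sample_txt none (some j)))) line ""
        ++ y ++ "\n"
        ++ PySem.List.pyGetD ((PySem.List.pyRange 0 (sample_txt.length : Int) 1).map
            (fun j => PySem.Str.join "" (PySem.List.slice sample_txt (some (j + 1)) none))) line "" := by
  rw [PySem.List.pyGetD_map_pyRange_of_nonneg _ _ _ _ h0 h1,
      PySem.List.pyGetD_map_pyRange_of_nonneg _ _ _ _ h0 h1,
      PySem.List.slice_to _ h0, PySem.List.slice_from _ (by omega)]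
  have hlt : line.toNat < sample_txt.length := by omega
  have h1' : (line + 1).toNat = line.toNat + 1 := by omega
  rw [h1', join_set_eq sample_txt line.toNat (y ++ "\n") hlt]
  apply String.toList_inj.mp
  simp

theorem inner_eq (sample_txt : List String) (y : String) (acc : List String) :
    (PySem.List.pyRange 0 (sample_txt.length : Int) 1).foldl (fun acc2 line =>
        acc2 ++ [PySem.Str.join "" (sample_txt.set line.toNat (y ++ "\n"))]) acc
      = (PySem.List.pyRange 0 (sample_txt.length : Int) 1).foldl (fun acc2 j =>
        acc2 ++ [PySem.List.pyGetD ((PySem.List.pyRange 0 (sample_txt.length : Int) 1).map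
              (fun j => PySem.Str.join "" (PySem.List.slice sample_txt none (some j)))) j ""
          ++ y ++ "\n"
          ++ PySem.List.pyGetD ((PySem.List.pyRange 0 (sample_txt.length : Int) 1).map
              (fun j => PySem.Str.join "" (PySem.List.slice sample_txt (some (j + 1)) none))) j ""]) acc := by
  apply PySem.List.foldl_congr_mem
  intro acc2 line hmem
  rcases (PySem.List.mem_pyRange_one.mp hmem) with ⟨h0, h1⟩
  rw [elem_eq sample_txt y line h0 h1]

-- ===== VERDICT (by name: the statement is the Claim_ definition above) =====
theorem large_positives_spec : Claim_equal_large_positives := by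
  intro sample_txt perm_inputs _
  unfold Spec_large_positives large_positives large_positives_alt
  apply PySem.List.foldl_congr_mem
  intro acc i _
  exact inner_eq sample_txt (PySem.Int.toStr (2 ^ i.toNat)) acc
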